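-- pv_equiv track=rewrite | github.com/pypi-data/pypi-mirror-160 | packages/homeworkpy/homeworkpy-0.2.1a0.tar.gz/homeworkpy-0.2.1a0/src/homeworkpy/tools.py | cluster
-- ===== SOURCE A (Python) =====
-- def cluster(data, maxgap):  # thanks stack overflow!!!
--     """Arrange data into groups where successive elements
--     differ by no more than *maxgap*
--
--     >>> cluster([1, 6, 9, 100, 102, 105, 109, 134, 139], maxgap=10)
--     [[1, 6, 9], [100, 102, 105, 109], [134, 139]]
--
--     >>> cluster([1, 6, 9, 99, 100, 102, 105, 134, 139, 141], maxgap=10)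
--     [[1, 6, 9], [99, 100, 102, 105], [134, 139, 141]]
--
--     """
--     data.sort()
--     groups = [[data[0]]]
--     for i in data[1:]:
--         if abs(i - groups[-1][-1]) <= maxgap:
--             groups[-1].append(i)
--         else:
--             groups.append([i])
--     return groups
-- ===== SOURCE B (Python) =====
-- def cluster(data, maxgap):
--     # Sorts data in place (same observable mutation as A); precomputes the break
--     # indices in one pass, then slices data between consecutive breaks.
--     # Returns [] for empty data (A raises IndexError there).
--     data.sort()
--     if not data:
--         return []
--     n = len(data)
--     breaks = [i for i in range(1, n) if data[i] - data[i - 1] > maxgap]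
--     groups = []
--     start = 0
--     for b in breaks + [n]:
--         groups.append(data[start:b])
--         start = b
--     return groups
-- ===== Notes on version B (the rewrite author's own statement) =====
-- stated objective: alternative
-- what changed: B sorts, precomputes the list of break indices (where adjacent sorted elements differ by more than maxgap) in one comprehension, then slices data between consecutive breaks, instead of A's incremental loop appending each element into groups[-1].
-- crash fix: On empty data A raises IndexError (data[0]); B returns []. — e.g. on cluster([], 0): A raises IndexError, B returns []
import Mathlib
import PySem

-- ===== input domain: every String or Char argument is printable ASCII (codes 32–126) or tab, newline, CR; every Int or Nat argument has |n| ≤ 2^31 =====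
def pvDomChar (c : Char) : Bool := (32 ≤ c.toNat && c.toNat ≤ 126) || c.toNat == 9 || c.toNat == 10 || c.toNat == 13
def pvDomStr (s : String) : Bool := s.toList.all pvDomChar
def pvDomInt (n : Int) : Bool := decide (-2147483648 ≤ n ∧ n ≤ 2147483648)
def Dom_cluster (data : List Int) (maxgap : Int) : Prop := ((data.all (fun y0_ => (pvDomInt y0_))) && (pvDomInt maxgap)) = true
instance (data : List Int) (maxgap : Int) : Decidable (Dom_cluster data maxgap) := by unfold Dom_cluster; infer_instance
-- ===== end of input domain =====

-- B precomputes the break indices of the sorted data in one pass and slices between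
-- consecutive breaks, instead of A's loop appending each element into groups[-1]; same
-- return value. Both Pythons sort `data` in place; the equivalence proved here is about
-- the return value.

-- ===== PORT A =====
-- groups[-1][-1] of the running group list (invariant: groups and its last group are nonempty)
def lastLast (groups : List (List Int)) : Int :=
  (((groups.getLast?).getD []).getLast?).getD 0

-- groups[-1].append(i)
def appendLast : List (List Int) → Int → List (List Int)
  | [], i => [[i]]
  | [g], i => [g ++ [i]]
  | g :: g' :: gs, i => g :: appendLast (g' :: gs) i

def cluster (data : List Int) (maxgap : Int) : List (List Int) :=
  match PySem.List.sorted data (fun x => x) false with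
  | [] => []   -- Python raises IndexError at data[0]; excluded by Pre_cluster
  | x :: rest =>
    rest.foldl (fun groups i =>
      if |i - lastLast groups| ≤ maxgap then appendLast groups i
      else groups ++ [[i]]) [[x]]

-- ===== PORT B =====
def cluster_alt (data : List Int) (maxgap : Int) : List (List Int) :=
  let d := PySem.List.sorted data (fun x => x) false
  if d.isEmpty then []
  else
    let n : Int := (d.length : Int)
    let breaks := (PySem.List.pyRange 1 n 1).filter
      (fun i => decide (PySem.List.pyGetD d i 0 - PySem.List.pyGetD d (i - 1) 0 > maxgap))
    (List.foldl (fun (st : List (List Int) × Int) (b : Int) =>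
        (st.1 ++ [PySem.List.slice d (some st.2) (some b)], b)) ([], 0) (breaks ++ [n])).1

-- ===== PRECONDITION & SPEC =====
-- Pre_ excludes only the empty list, on which A raises IndexError (data[0]).
def Pre_cluster (data : List Int) (maxgap : Int) : Prop := data ≠ []
instance (data : List Int) (maxgap : Int) : Decidable (Pre_cluster data maxgap) := by
  unfold Pre_cluster; infer_instance

def pvWitness_cluster : List Int × Int := ([1, 6, 9, 100, 102], 10)

-- On empty data A raises IndexError (data[0]); B returns [].
def Raises_cluster (data : List Int) (maxgap : Int) : Prop := data = []
instance (data : List Int) (maxgap : Int) : Decidable (Raises_cluster data maxgap) := by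
  unfold Raises_cluster; infer_instance
def pvRaiseWitness_cluster : List Int × Int := ([], 0)
def pvRaiseWitnessOut_cluster : List (List Int) := []

def Spec_cluster (data : List Int) (maxgap : Int) (out : List (List Int)) : Prop := out = cluster_alt data maxgap
instance (data : List Int) (maxgap : Int) (out : List (List Int)) : Decidable (Spec_cluster data maxgap out) := by unfold Spec_cluster; infer_instance

-- ===== CLAIM (what is proved, stated in full; the proofs are below) =====
def Claim_equal_cluster : Prop := ∀ (data : List Int) (maxgap : Int), Dom_cluster data maxgap → Pre_cluster data maxgap → Spec_cluster data maxgap (cluster data maxgap)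
def Claim_raises_cluster : Prop := (∀ (data : List Int) (maxgap : Int), Dom_cluster data maxgap → Raises_cluster data maxgap → ¬ Pre_cluster data maxgap) ∧ (Dom_cluster (pvRaiseWitness_cluster.1) (pvRaiseWitness_cluster.2) ∧ Raises_cluster (pvRaiseWitness_cluster.1) (pvRaiseWitness_cluster.2) ∧ cluster_alt (pvRaiseWitness_cluster.1) (pvRaiseWitness_cluster.2) = pvRaiseWitnessOut_cluster)

-- ===== LEMMAS AND PROOFS =====

-- common middle form: (first group, remaining groups) of grouping x :: xs by condition `c prev next`
def grp (c : Int → Int → Bool) :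
    Int → List Int → List Int × List (List Int)
  | x, [] => ([x], [])
  | x, y :: ys =>
    let r := grp c y ys
    if c x y then (x :: r.1, r.2) else ([x], r.1 :: r.2)

lemma appendLast_concat (gs : List (List Int)) (u : List Int) (i : Int) :
    appendLast (gs ++ [u]) i = gs ++ [u ++ [i]] := by
  induction gs with
  | nil => simp [appendLast]
  | cons g t ih =>
    cases t with
    | nil => simp [appendLast]
    | cons g' t' => simpa [appendLast] using ih

lemma lastLast_concat (gs : List (List Int)) (c : List Int) (x : Int) :
    lastLast (gs ++ [c ++ [x]]) = x := by
  simp [lastLast]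

lemma foldA (maxgap : Int) (xs : List Int) : ∀ (gs : List (List Int)) (c : List Int) (x : Int),
    List.foldl (fun groups i =>
        if |i - lastLast groups| ≤ maxgap then appendLast groups i
        else groups ++ [[i]]) (gs ++ [c ++ [x]]) xs
      = gs ++ (c ++ (grp (fun a b => decide (|b - a| ≤ maxgap)) x xs).1)
             :: (grp (fun a b => decide (|b - a| ≤ maxgap)) x xs).2 := by
  induction xs with
  | nil => intro gs c x; simp [grp]
  | cons y ys ih =>
    intro gs c x
    simp only [List.foldl_cons, lastLast_concat, grp]
    by_cases h : |y - x| ≤ maxgap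
    · rw [if_pos h, appendLast_concat]
      have := ih gs (c ++ [x]) y
      simp only [List.append_assoc] at this ⊢
      rw [this]
      simp [if_pos h]
    · rw [if_neg h]
      have := ih (gs ++ [c ++ [x]]) [] y
      simp only [List.nil_append] at this
      rw [this]
      simp [if_neg h]

-- break indices of the sorted list: `brks g x xs k` lists the positions (starting at k,
-- the index of xs.head) where the gap from the previous element exceeds g
def brks (g : Int) : Int → List Int → Nat → List Nat
  | _, [], _ => []
  | x, y :: ys, k => (if y - x > g then [k] else []) ++ brks g y ys (k + 1)

-- the comprehension over range(k, n) computes exactly brks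
lemma filt_eq_brks (d : List Int) (g : Int) : ∀ (m k : Nat), m = d.length - k → 1 ≤ k →
    (PySem.List.pyRange (k : Int) (d.length : Int) 1).filter
      (fun i => decide (PySem.List.pyGetD d i 0 - PySem.List.pyGetD d (i - 1) 0 > g))
    = (brks g (d.getD (k - 1) 0) (d.drop k) (k)).map Int.ofNat := by
  intro m
  induction m with
  | zero =>
    intro k hm hk
    have hlen : d.length ≤ k := by omega
    have h1 : PySem.List.pyRange (k : Int) (d.length : Int) 1 = [] := by
      simp [PySem.List.pyRange]; omega
    have h2 : d.drop k = [] := List.drop_eq_nil_of_le hlen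
    simp [h1, h2, brks]
  | succ m ih =>
    intro k hm hk
    have hklt : k < d.length := by omega
    have hcons : PySem.List.pyRange (k : Int) (d.length : Int) 1
        = (k : Int) :: PySem.List.pyRange ((k : Int) + 1) (d.length : Int) 1 :=
      PySem.List.pyRange_one_cons (by exact_mod_cast hklt)
    have hdrop : d.drop k = d[k] :: d.drop (k + 1) := List.drop_eq_getElem_cons hklt
    have hsub : (k : Int) - 1 = ((k - 1 : Nat) : Int) := by omega
    have hget : PySem.List.pyGetD d (k : Int) 0 = d[k] := by
      rw [PySem.List.pyGetD_natCast]; exact List.getD_eq_getElem d 0 hklt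
    have hget' : d.getD k 0 = d[k] := List.getD_eq_getElem d 0 hklt
    have hcast : ((k : Nat) : Int) + 1 = ((k + 1 : Nat) : Int) := by omega
    rw [hcons, List.filter_cons, hdrop]
    simp only [brks, hget, hsub, PySem.List.pyGetD_natCast, hcast]
    rw [ih (k + 1) (by omega) (by omega)]
    have : d.getD (k + 1 - 1) 0 = d[k] := by simpa using hget'
    rw [this]
    simp only [List.getD_eq_getElem?_getD] at *
    by_cases h : g < d[k] - d[k - 1]?.getD 0
    · simp [h]
    · simp [h]

-- the slicing fold over (brks ++ [n]) produces the grp groups, with prefix c already cut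
lemma foldS (d : List Int) (g : Int) (xs : List Int) : ∀ (x : Int) (c : List Int) (s : Nat)
    (acc : List (List Int)), d.drop s = c ++ x :: xs →
    (List.foldl (fun (st : List (List Int) × Int) (b : Int) =>
        (st.1 ++ [PySem.List.slice d (some st.2) (some b)], b)) (acc, (s : Int))
      ((brks g x xs (s + c.length + 1)).map Int.ofNat ++ [(d.length : Int)])).1
    = acc ++ (c ++ (grp (fun a b => decide (b - a ≤ g)) x xs).1)
           :: (grp (fun a b => decide (b - a ≤ g)) x xs).2 := by
  induction xs with
  | nil =>
    intro x c s acc hdrop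
    have hlen : d.length - s = c.length + 1 := by
      have := congrArg List.length hdrop
      simp at this; omega
    have hslice : PySem.List.slice d (some (s : Int)) (some (d.length : Int))
        = c ++ [x] := by
      rw [PySem.List.slice_natCast]
      rw [hdrop, hlen]
      exact List.take_of_length_le (by simp)
    simp [brks, grp, hslice]
  | cons y ys ih =>
    intro x c s acc hdrop
    have hdrop' : d.drop (s + c.length + 1) = y :: ys := by
      have : d.drop (s + (c.length + 1)) = ((c ++ [x]) ++ y :: ys).drop (c.length + 1) := by
        rw [← List.drop_drop, hdrop]; simp
      simpa [List.drop_append_of_le_length, Nat.add_assoc] using this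
    by_cases h : y - x ≤ g
    · have hb : ¬ (y - x > g) := by omega
      simp only [brks, if_neg hb, List.nil_append]
      have := ih y (c ++ [x]) s acc (by rw [hdrop]; simp)
      simp only [List.length_append, List.length_cons, List.length_nil] at this ⊢
      have harith : s + (c.length + 1) + 1 = s + c.length + 1 + 1 := by omega
      rw [harith] at this
      rw [this]
      simp [grp, h]
    · have hb : y - x > g := by omega
      simp only [brks, if_pos hb, List.map_cons, List.map_append, List.cons_append,
        List.foldl_cons]
      have hslice : PySem.List.slice d (some (s : Int)) (some ((s + c.length + 1 : Nat) : Int))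
          = c ++ [x] := by
        rw [PySem.List.slice_natCast, hdrop]
        have : s + c.length + 1 - s = c.length + 1 := by omega
        rw [this]
        rw [show c ++ x :: y :: ys = (c ++ [x]) ++ y :: ys by simp]
        rw [List.take_append_of_le_length (by simp)]
        exact List.take_of_length_le (by simp)
      have := ih y [] (s + c.length + 1) (acc ++ [c ++ [x]]) (by simpa using hdrop')
      simp only [List.length_nil, Nat.add_zero, List.map_nil, List.nil_append,
        Int.ofNat_eq_natCast] at this ⊢
      rw [hslice, this]
      simp [grp, h]

lemma grp_congr (maxgap : Int) (xs : List Int) : ∀ (x : Int),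
    List.Pairwise (· ≤ ·) (x :: xs) →
    grp (fun a b => decide (|b - a| ≤ maxgap)) x xs
      = grp (fun a b => decide (b - a ≤ maxgap)) x xs := by
  induction xs with
  | nil => intro x _; rfl
  | cons y ys ih =>
    intro x hp
    have hxy : x ≤ y := (List.pairwise_cons.1 hp).1 y (by simp)
    have hp' : List.Pairwise (· ≤ ·) (y :: ys) := (List.pairwise_cons.1 hp).2
    have habs : |y - x| = y - x := abs_of_nonneg (by omega)
    simp only [grp, ih y hp', habs]

theorem cluster_eq (data : List Int) (maxgap : Int) (h : data ≠ []) :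
    cluster data maxgap = cluster_alt data maxgap := by
  unfold cluster cluster_alt
  have hnil : PySem.List.sorted data (fun x => x) false ≠ [] := by
    simpa [PySem.List.sorted_eq_nil_iff] using h
  obtain ⟨x, rest, hs⟩ := List.exists_cons_of_ne_nil hnil
  have hpw : List.Pairwise (· ≤ ·) (x :: rest) := by
    have := PySem.List.sorted_pairwise (xs := data) (key := fun x => x)
    rw [hs] at this; simpa using this
  rw [hs]
  show List.foldl (fun groups i =>
      if |i - lastLast groups| ≤ maxgap then appendLast groups i
      else groups ++ [[i]]) [[x]] rest = _
  have hA := foldA maxgap rest [] [] x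
  simp only [List.nil_append] at hA
  rw [hA, grp_congr maxgap rest x hpw]
  have hfilt := filt_eq_brks (x :: rest) maxgap ((x :: rest).length - 1) 1 rfl (by omega)
  have hfoldS := foldS (x :: rest) maxgap rest x [] 0 [] (by simp)
  simp only [List.drop_one, List.tail_cons, Nat.sub_self, List.getD_cons_zero,
    Nat.cast_one] at hfilt
  simp only [List.length_nil, Nat.zero_add, Nat.cast_zero, List.nil_append] at hfoldS
  simp only [List.isEmpty_cons, Bool.false_eq_true, if_false]
  rw [show ((1 : Int)) = ((1 : Nat) : Int) by norm_num] at hfilt ⊢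
  rw [hfilt, hfoldS]

-- ===== VERDICT (by name: the statement is the Claim_ definition above) =====
theorem cluster_spec : Claim_equal_cluster := by
  intro data maxgap _ hpre
  unfold Spec_cluster
  exact cluster_eq data maxgap hpre

theorem cluster_raises : Claim_raises_cluster := by
  unfold Claim_raises_cluster
  exact ⟨fun data maxgap _ hr hp => hp hr, by decide⟩

-- witness self-check: the raise-witness lies in Raises_ and B's port returns the stated literal there
theorem cluster_raises_witness_ok :
    Raises_cluster pvRaiseWitness_cluster.1 pvRaiseWitness_cluster.2 ∧
      cluster_alt pvRaiseWitness_cluster.1 pvRaiseWitness_cluster.2 = pvRaiseWitnessOut_cluster :=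
  cluster_raises.2.2
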